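-- pv_equiv track=rewrite | github.com/Ov3rxn4ght-Projects/Trong-Tinh | CTF/Crypto/Cookie_Han_Hoan/solve.py | rev_mul_func
-- ===== SOURCE A (Python) =====
-- def rev_mul_func(k):
--     ori = k
--     for i in range(2**32):
--         x = (k * 2898124289) & 0xffffffff
--         if (x * 2898124289 & 0xffffffff) == ori:
--             return (x)
--         k = (k * 2898124289) & 0xffffffff
--
--     return None
-- ===== SOURCE B (Python) =====
-- def rev_mul_func(k):
--     M = 1 << 32
--     C = 2898124289
--
--     def egcd(a, b):
--         if b == 0:
--             return (a, 1, 0)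
--         g, x, y = egcd(b, a % b)
--         return (g, y, x - (a // b) * y)
--
--     _, inv, _ = egcd(C, M)
--     return (k * inv) % M
-- ===== Notes on version B (the rewrite author's own statement) =====
-- stated objective: faster
-- what changed: A walks the multiplicative orbit of k under 2898124289 mod 2^32 (up to 2^32 multiply-and-test iterations) until it finds x with x*c == k mod 2^32; B computes the modular inverse of 2898124289 mod 2^32 once with the extended Euclidean algorithm and returns (k*inv) mod 2^32 directly.
-- outside the precondition, e.g. on rev_mul_func(-1): A does not finish within the time limit, B returns 2553929215
import Mathlib
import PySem

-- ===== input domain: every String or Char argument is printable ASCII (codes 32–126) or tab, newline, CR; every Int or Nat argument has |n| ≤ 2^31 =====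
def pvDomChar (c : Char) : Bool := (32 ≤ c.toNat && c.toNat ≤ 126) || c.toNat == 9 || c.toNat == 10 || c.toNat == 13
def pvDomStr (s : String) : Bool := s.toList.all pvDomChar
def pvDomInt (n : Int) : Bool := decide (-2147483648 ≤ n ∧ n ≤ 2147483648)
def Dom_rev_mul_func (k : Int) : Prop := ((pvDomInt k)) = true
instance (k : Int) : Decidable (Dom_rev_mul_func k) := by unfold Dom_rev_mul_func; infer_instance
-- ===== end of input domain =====

-- B replaces A's brute-force orbit walk (multiply by 2898124289 up to 2^32 times) by the
-- extended Euclidean algorithm: x = k * inv(2898124289) mod 2^32 (objective: faster, asymptotic).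

-- ===== PORT A =====
-- Python's `& 0xffffffff` on an arbitrary int equals `% 2^32`; Lean's Int.emod is nonnegative
-- for a positive modulus, exactly Python's semantics.  The `for i in range(2**32)` loop with
-- early return is ported as fuel recursion over 2^32 steps on the same state.
def revMulLoopA : Nat → Int → Int → Option Int
  | 0, _, _ => none
  | n + 1, k, ori =>
    let x := k * 2898124289 % 4294967296
    if x * 2898124289 % 4294967296 = ori then some x
    else revMulLoopA n (k * 2898124289 % 4294967296) ori

def rev_mul_func (k : Int) : Option Int :=
  revMulLoopA 4294967296 k k

-- ===== PORT B =====
-- extended Euclid: egcd fuel a b = (g, x, y) with a*x + b*y = g; the fuel argument only makes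
-- the recursion structural (64 > number of Euclid steps for arguments ≤ 2^32, so it is never hit).
def revMulEgcd : Nat → Nat → Nat → Nat × Int × Int
  | 0, a, _ => (a, 1, 0)
  | fuel + 1, a, b =>
    if b = 0 then (a, 1, 0)
    else
      let r := revMulEgcd fuel b (a % b)
      (r.1, r.2.2, r.2.1 - (a / b : Nat) * r.2.2)

def rev_mul_func_alt (k : Int) : Option Int :=
  some (k * (revMulEgcd 64 2898124289 4294967296).2.1 % 4294967296)

-- ===== PRECONDITION & SPEC =====
-- Pre_ excludes negative k: there A's comparison `(x * c & 0xffffffff) == ori` can never hold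
-- (the left side is nonnegative), so A returns None only after exhausting all 2^32 iterations —
-- practically divergent — while B naturally returns the modular solution.
def Pre_rev_mul_func (k : Int) : Prop := 0 ≤ k
instance (k : Int) : Decidable (Pre_rev_mul_func k) := by unfold Pre_rev_mul_func; infer_instance

def pvWitness_rev_mul_func : Int := (12345)

def Spec_rev_mul_func (k : Int) (out : Option Int) : Prop := out = rev_mul_func_alt k
instance (k : Int) (out : Option Int) : Decidable (Spec_rev_mul_func k out) := by unfold Spec_rev_mul_func; infer_instance

-- ===== CLAIM (what is proved, stated in full; the proofs are below) =====
def Claim_equal_rev_mul_func : Prop := ∀ (k : Int), Dom_rev_mul_func k → Pre_rev_mul_func k → Spec_rev_mul_func k (rev_mul_func k)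

-- ===== LEMMAS AND PROOFS =====

-- the loop state after j steps
def revMulSt (k : Int) : Nat → Int
  | 0 => k
  | j + 1 => revMulSt k j * 2898124289 % 4294967296

-- squaring chain: revMulSq j = 2898124289 ^ (2 ^ j) % 2^32
def revMulSq : Nat → Int
  | 0 => 2898124289 % 4294967296
  | j + 1 => revMulSq j * revMulSq j % 4294967296

lemma revMulSq_eq (j : Nat) : revMulSq j = 2898124289 ^ (2 ^ j) % 4294967296 := by
  induction j with
  | zero => simp [revMulSq]
  | succ j ih =>
      have : (2898124289 : Int) ^ (2 ^ (j + 1)) = 2898124289 ^ (2 ^ j) * 2898124289 ^ (2 ^ j) := by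
        rw [← pow_add]; ring_nf
      simp [revMulSq, ih, this, Int.mul_emod]

lemma revMul_pow_ord : (2898124289 : Int) ^ (2 ^ 23) % 4294967296 = 1 := by
  have h : revMulSq 23 = 1 := by decide
  rw [← revMulSq_eq]; exact h

lemma revMulSt_eq (k : Int) (j : Nat) :
    revMulSt k (j + 1) = k * 2898124289 ^ (j + 1) % 4294967296 := by
  induction j with
  | zero => simp [revMulSt]
  | succ j ih =>
      show revMulSt k (j + 1) * 2898124289 % 4294967296 = _
      rw [ih]
      conv_rhs => rw [pow_succ, ← mul_assoc]
      rw [Int.mul_emod, Int.emod_emod_of_dvd _ (dvd_refl _), ← Int.mul_emod]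

lemma revMulSt_shift (k : Int) (j : Nat) :
    revMulSt (k * 2898124289 % 4294967296) j = revMulSt k (j + 1) := by
  induction j with
  | zero => rfl
  | succ j ih => show revMulSt _ j * _ % _ = _; rw [ih]; rfl

-- soundness: whatever the loop returns solves x * c ≡ ori (mod 2^32) and lies in [0, 2^32)
lemma revMulLoopA_sound (n : Nat) :
    ∀ k ori x, revMulLoopA n k ori = some x →
      x * 2898124289 % 4294967296 = ori ∧ 0 ≤ x ∧ x < 4294967296 := by
  induction n with
  | zero => intro k ori x h; simp [revMulLoopA] at h
  | succ n ih =>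
      intro k ori x h
      simp only [revMulLoopA] at h
      split_ifs at h with hc
      · obtain rfl : k * 2898124289 % 4294967296 = x := by simpa using h
        exact ⟨hc, Int.emod_nonneg _ (by norm_num), Int.emod_lt_of_pos _ (by norm_num)⟩
      · exact ih _ _ _ h

-- completeness: if some step j < n satisfies the test, the loop returns a value
lemma revMulLoopA_some (n : Nat) :
    ∀ k ori, (∃ j, j < n ∧ revMulSt k (j + 1) * 2898124289 % 4294967296 = ori) →
      ∃ x, revMulLoopA n k ori = some x := by
  induction n with
  | zero => intro k ori ⟨j, hj, _⟩; omega
  | succ n ih =>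
      intro k ori ⟨j, hj, hcond⟩
      simp only [revMulLoopA]
      split_ifs with hne
      · exact ⟨_, rfl⟩
      · apply ih
        cases j with
        | zero => exact absurd hcond (by simpa [revMulSt] using hne)
        | succ j =>
            exact ⟨j, by omega, by rw [revMulSt_shift]; exact hcond⟩

lemma revMul_inv_val : (revMulEgcd 64 2898124289 4294967296).2.1 = 1741038081 := by decide

lemma revMul_c_inv : (2898124289 : Int) * 1741038081 % 4294967296 = 1 := by decide

-- ===== VERDICT (by name: the statement is the Claim_ definition above) =====
theorem rev_mul_func_spec : Claim_equal_rev_mul_func := by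
  intro k hdom hpre
  unfold Spec_rev_mul_func rev_mul_func rev_mul_func_alt
  rw [revMul_inv_val]
  have hkM : k % 4294967296 = k := by
    have : k ≤ 2147483648 := by
      have := of_decide_eq_true (by simpa [Dom_rev_mul_func, pvDomInt] using hdom)
      exact this.2
    exact Int.emod_eq_of_lt hpre (by omega)
  -- the loop succeeds: step j = 2^23 - 2 satisfies the test
  obtain ⟨x, hx⟩ := revMulLoopA_some 4294967296 k k
    ⟨2 ^ 23 - 2, by norm_num, by
      rw [revMulSt_eq]
      rw [Int.mul_emod, Int.emod_emod_of_dvd _ (dvd_refl _), ← Int.mul_emod, mul_assoc, ← pow_succ]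
      have h1 : (2 ^ 23 - 2) + 1 + 1 = 2 ^ 23 := by norm_num
      rw [h1, Int.mul_emod, revMul_pow_ord, mul_one, Int.emod_emod_of_dvd _ (dvd_refl _), hkM]⟩
  obtain ⟨hsol, hx0, hxM⟩ := revMulLoopA_sound 4294967296 k k x hx
  rw [hx]
  -- uniqueness: x ≡ k * inv (mod 2^32) and both sides are reduced
  set y : Int := k * 1741038081 % 4294967296 with hy
  have hyM : y % 4294967296 = y := Int.emod_emod_of_dvd _ (dvd_refl _)
  have hmod : x % 4294967296 = y % 4294967296 := by
    have e1 : Int.ModEq 4294967296 (2898124289 * 1741038081) 1 := by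
      unfold Int.ModEq; rw [revMul_c_inv]; decide
    have e2 : Int.ModEq 4294967296 (x * 2898124289) k := by
      unfold Int.ModEq; rw [hsol, hkM]
    calc x % 4294967296
        = x * 1 % 4294967296 := by rw [mul_one]
      _ = x * (2898124289 * 1741038081) % 4294967296 := ((e1.mul_left x).symm : _)
      _ = (x * 2898124289) * 1741038081 % 4294967296 := by ring_nf
      _ = k * 1741038081 % 4294967296 := (e2.mul_right 1741038081 : _)
      _ = y % 4294967296 := by rw [hy, hyM]
  have hxr : x % 4294967296 = x := Int.emod_eq_of_lt hx0 hxM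
  rw [← hxr, hmod, hyM]
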